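-- pv_equiv track=rewrite | github.com/bgross0/data-migrator | backend/app/field_mapper/matching/cell_data_analyzer.py | _matches_boolean_values
-- ===== SOURCE A (Python) =====
-- from typing import List, Dict, Any, Optional, Set
--
-- def _matches_boolean_values(unique_values: Set[str]) -> bool:
--     """Check if values are boolean-like."""
--     boolean_sets = [
--         {"yes", "no"},
--         {"true", "false"},
--         {"1", "0"},
--         {"y", "n"},
--         {"active", "inactive"},
--         {"enabled", "disabled"}
--     ]
--
--     for bool_set in boolean_sets:
--         if unique_values <= bool_set:
--             return True
--     return False
-- ===== SOURCE B (Python) =====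
-- _PAIR_ID = {
--     "yes": 0, "no": 0,
--     "true": 1, "false": 1,
--     "1": 2, "0": 2,
--     "y": 3, "n": 3,
--     "active": 4, "inactive": 4,
--     "enabled": 5, "disabled": 5,
-- }
--
-- def _matches_boolean_values(unique_values):
--     """Check if values are boolean-like."""
--     pair_id = None
--     for v in unique_values:
--         i = _PAIR_ID.get(v)
--         if i is None:
--             return False
--         if pair_id is None:
--             pair_id = i
--         elif pair_id != i:
--             return False
--     return True
-- ===== Notes on version B (the rewrite author's own statement) =====
-- stated objective: idiomatic
-- what changed: Replaced the six subset scans over fixed two-element sets by a single pass over the values using one token-to-pair-id dictionary, returning False on an unknown token or a pair-id mismatch.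
import Mathlib
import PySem

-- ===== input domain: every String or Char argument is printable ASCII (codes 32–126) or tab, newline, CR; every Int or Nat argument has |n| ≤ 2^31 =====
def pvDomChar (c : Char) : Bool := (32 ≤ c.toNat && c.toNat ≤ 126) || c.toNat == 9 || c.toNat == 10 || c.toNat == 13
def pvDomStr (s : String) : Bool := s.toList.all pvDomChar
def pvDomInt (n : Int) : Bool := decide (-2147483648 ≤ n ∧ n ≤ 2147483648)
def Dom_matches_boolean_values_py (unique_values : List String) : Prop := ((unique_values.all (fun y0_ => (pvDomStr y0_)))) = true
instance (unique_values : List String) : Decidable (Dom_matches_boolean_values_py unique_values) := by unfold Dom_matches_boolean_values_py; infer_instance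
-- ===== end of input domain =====

-- B replaces A's six subset scans by one pass over the values with a single token→pair-id dictionary (idiomatic single-pass rewrite).

-- ===== PORT A =====
-- the literal list of the six boolean-like sets from A
def pvBoolSets : List (PySem.Set String) :=
  [PySem.Set.ofList ["yes", "no"],
   PySem.Set.ofList ["true", "false"],
   PySem.Set.ofList ["1", "0"],
   PySem.Set.ofList ["y", "n"],
   PySem.Set.ofList ["active", "inactive"],
   PySem.Set.ofList ["enabled", "disabled"]]

-- 'for bool_set in boolean_sets: if unique_values <= bool_set: return True / return False'
def pvSubsetLoop (uv : PySem.Set String) : List (PySem.Set String) → Bool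
  | [] => false
  | s :: rest => if PySem.Set.issubset uv s then true else pvSubsetLoop uv rest

def matches_boolean_values_py (unique_values : List String) : Bool :=
  pvSubsetLoop unique_values pvBoolSets

-- ===== PORT B =====
-- the module-level dict _PAIR_ID of Source B
def pvPairId : PySem.Dict String Int :=
  PySem.Dict.ofList
    [("yes", 0), ("no", 0), ("true", 1), ("false", 1), ("1", 2), ("0", 2),
     ("y", 3), ("n", 3), ("active", 4), ("inactive", 4), ("enabled", 5), ("disabled", 5)]

-- 'for v in unique_values: i = _PAIR_ID.get(v); …' with the running pair_id (None at first)
def pvAltLoop (pair_id : Option Int) : List String → Bool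
  | [] => true
  | v :: rest =>
    match PySem.Dict.get? pvPairId v with
    | none => false
    | some i =>
      match pair_id with
      | none => pvAltLoop (some i) rest
      | some p => if p ≠ i then false else pvAltLoop (some p) rest

def matches_boolean_values_py_alt (unique_values : List String) : Bool :=
  pvAltLoop none unique_values

-- ===== PRECONDITION & SPEC =====
def Spec_matches_boolean_values_py (unique_values : List String) (out : Bool) : Prop := out = matches_boolean_values_py_alt unique_values
instance (unique_values : List String) (out : Bool) : Decidable (Spec_matches_boolean_values_py unique_values out) := by unfold Spec_matches_boolean_values_py; infer_instance

-- ===== CLAIM (what is proved, stated in full; the proofs are below) =====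
def Claim_equal_matches_boolean_values_py : Prop := ∀ (unique_values : List String), Dom_matches_boolean_values_py unique_values → Spec_matches_boolean_values_py unique_values (matches_boolean_values_py unique_values)

-- ===== LEMMAS AND PROOFS =====

-- the literal association list behind pvPairId (ofList inserts 12 distinct keys in order)
theorem pvPairId_eq : pvPairId = PySem.Dict.mk
    [("yes", 0), ("no", 0), ("true", 1), ("false", 1), ("1", 2), ("0", 2),
     ("y", 3), ("n", 3), ("active", 4), ("inactive", 4), ("enabled", 5), ("disabled", 5)] := by decide

-- the six set literals, evaluated
theorem pvBoolSets_eq : pvBoolSets =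
    [(["yes", "no"] : PySem.Set String), ["true", "false"], ["1", "0"], ["y", "n"],
     ["active", "inactive"], ["enabled", "disabled"]] := by decide

-- running with a fixed pair id just checks every remaining value maps to that id
theorem pvAltLoop_some (i : Int) (uv : List String) :
    pvAltLoop (some i) uv = uv.all (fun v => PySem.Dict.get? pvPairId v == some i) := by
  induction uv with
  | nil => rfl
  | cons v rest ih =>
    simp only [pvAltLoop, List.all_cons]
    cases h : PySem.Dict.get? pvPairId v with
    | none => simp
    | some j =>
      by_cases hij : i = j
      · subst hij; simp [ih]
      · simp [hij, Ne.symm hij]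

-- membership in the j-th boolean set equals mapping to pair id j
theorem pvKey0 (v : String) :
    PySem.Set.contains (["yes", "no"] : PySem.Set String) v = (PySem.Dict.get? pvPairId v == some 0) := by
  by_cases h1 : v = "yes"
  · subst h1; decide
  by_cases h2 : v = "no"
  · subst h2; decide
  have hL : PySem.Set.contains (["yes", "no"] : PySem.Set String) v = false := by
    simp [PySem.Set.contains_eq_listContains, h1, h2]
  rw [hL, pvPairId_eq]
  simp only [PySem.Dict.get?_mk_cons]
  rw [if_neg (fun h => h1 (eq_of_beq h).symm), if_neg (fun h => h2 (eq_of_beq h).symm)]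
  split_ifs <;> first | decide | simp [PySem.Dict.get?]

theorem pvKey1 (v : String) :
    PySem.Set.contains (["true", "false"] : PySem.Set String) v = (PySem.Dict.get? pvPairId v == some 1) := by
  by_cases h1 : v = "true"
  · subst h1; decide
  by_cases h2 : v = "false"
  · subst h2; decide
  have hL : PySem.Set.contains (["true", "false"] : PySem.Set String) v = false := by
    simp [PySem.Set.contains_eq_listContains, h1, h2]
  rw [hL, pvPairId_eq]
  simp only [PySem.Dict.get?_mk_cons]
  rw [if_neg (fun h => h1 (eq_of_beq h).symm), if_neg (fun h => h2 (eq_of_beq h).symm)]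
  split_ifs <;> first | decide | simp [PySem.Dict.get?]

theorem pvKey2 (v : String) :
    PySem.Set.contains (["1", "0"] : PySem.Set String) v = (PySem.Dict.get? pvPairId v == some 2) := by
  by_cases h1 : v = "1"
  · subst h1; decide
  by_cases h2 : v = "0"
  · subst h2; decide
  have hL : PySem.Set.contains (["1", "0"] : PySem.Set String) v = false := by
    simp [PySem.Set.contains_eq_listContains, h1, h2]
  rw [hL, pvPairId_eq]
  simp only [PySem.Dict.get?_mk_cons]
  rw [if_neg (fun h => h1 (eq_of_beq h).symm), if_neg (fun h => h2 (eq_of_beq h).symm)]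
  split_ifs <;> first | decide | simp [PySem.Dict.get?]

theorem pvKey3 (v : String) :
    PySem.Set.contains (["y", "n"] : PySem.Set String) v = (PySem.Dict.get? pvPairId v == some 3) := by
  by_cases h1 : v = "y"
  · subst h1; decide
  by_cases h2 : v = "n"
  · subst h2; decide
  have hL : PySem.Set.contains (["y", "n"] : PySem.Set String) v = false := by
    simp [PySem.Set.contains_eq_listContains, h1, h2]
  rw [hL, pvPairId_eq]
  simp only [PySem.Dict.get?_mk_cons]
  rw [if_neg (fun h => h1 (eq_of_beq h).symm), if_neg (fun h => h2 (eq_of_beq h).symm)]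
  split_ifs <;> first | decide | simp [PySem.Dict.get?]

theorem pvKey4 (v : String) :
    PySem.Set.contains (["active", "inactive"] : PySem.Set String) v = (PySem.Dict.get? pvPairId v == some 4) := by
  by_cases h1 : v = "active"
  · subst h1; decide
  by_cases h2 : v = "inactive"
  · subst h2; decide
  have hL : PySem.Set.contains (["active", "inactive"] : PySem.Set String) v = false := by
    simp [PySem.Set.contains_eq_listContains, h1, h2]
  rw [hL, pvPairId_eq]
  simp only [PySem.Dict.get?_mk_cons]
  rw [if_neg (fun h => h1 (eq_of_beq h).symm), if_neg (fun h => h2 (eq_of_beq h).symm)]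
  split_ifs <;> first | decide | simp [PySem.Dict.get?]

theorem pvKey5 (v : String) :
    PySem.Set.contains (["enabled", "disabled"] : PySem.Set String) v = (PySem.Dict.get? pvPairId v == some 5) := by
  by_cases h1 : v = "enabled"
  · subst h1; decide
  by_cases h2 : v = "disabled"
  · subst h2; decide
  have hL : PySem.Set.contains (["enabled", "disabled"] : PySem.Set String) v = false := by
    simp [PySem.Set.contains_eq_listContains, h1, h2]
  rw [hL, pvPairId_eq]
  simp only [PySem.Dict.get?_mk_cons]
  rw [if_neg (fun h => h1 (eq_of_beq h).symm), if_neg (fun h => h2 (eq_of_beq h).symm)]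
  split_ifs <;> first | decide | simp [PySem.Dict.get?]

-- the lookup can only yield one of the six pair ids
theorem pvGetCases (v : String) :
    PySem.Dict.get? pvPairId v = none ∨ PySem.Dict.get? pvPairId v = some 0 ∨
    PySem.Dict.get? pvPairId v = some 1 ∨ PySem.Dict.get? pvPairId v = some 2 ∨
    PySem.Dict.get? pvPairId v = some 3 ∨ PySem.Dict.get? pvPairId v = some 4 ∨
    PySem.Dict.get? pvPairId v = some 5 := by
  cases h : PySem.Dict.get? pvPairId v with
  | none => exact Or.inl rfl
  | some j =>
    have hm := PySem.Dict.mem_items_of_get?_eq_some pvPairId h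
    rw [pvPairId_eq] at hm
    simp only [List.mem_cons, List.not_mem_nil, or_false, Prod.mk.injEq] at hm
    rcases hm with ⟨_, rfl⟩ | ⟨_, rfl⟩ | ⟨_, rfl⟩ | ⟨_, rfl⟩ | ⟨_, rfl⟩ | ⟨_, rfl⟩ |
      ⟨_, rfl⟩ | ⟨_, rfl⟩ | ⟨_, rfl⟩ | ⟨_, rfl⟩ | ⟨_, rfl⟩ | ⟨_, rfl⟩ <;> simp_all

-- A unfolded: the or-chain of the six all-membership checks, each rewritten through the pair-id lookup
theorem pvA_eq (uv : List String) :
    matches_boolean_values_py uv =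
      (uv.all (fun v => PySem.Dict.get? pvPairId v == some 0) ||
       uv.all (fun v => PySem.Dict.get? pvPairId v == some 1) ||
       uv.all (fun v => PySem.Dict.get? pvPairId v == some 2) ||
       uv.all (fun v => PySem.Dict.get? pvPairId v == some 3) ||
       uv.all (fun v => PySem.Dict.get? pvPairId v == some 4) ||
       uv.all (fun v => PySem.Dict.get? pvPairId v == some 5)) := by
  simp only [matches_boolean_values_py, pvBoolSets_eq, pvSubsetLoop, PySem.Set.issubset,
    pvKey0, pvKey1, pvKey2, pvKey3, pvKey4, pvKey5]
  split_ifs <;> simp [*]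

-- ===== VERDICT (by name: the statement is the Claim_ definition above) =====
theorem matches_boolean_values_py_spec : Claim_equal_matches_boolean_values_py := by
  intro uv _
  unfold Spec_matches_boolean_values_py
  rw [pvA_eq]
  cases uv with
  | nil => rfl
  | cons v rest =>
    simp only [matches_boolean_values_py_alt, pvAltLoop, List.all_cons]
    rcases pvGetCases v with h | h | h | h | h | h | h <;>
      simp [h, pvAltLoop_some]
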